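-- pv_equiv track=rewrite | github.com/colinxy/ProjectEuler | Python/project_euler161.py | fill_col
-- ===== SOURCE A (Python) =====
-- def fill_col(state):
--     if all(i > 0 for i in state):
--         return [state]
--
--     index = state.index(0)
--     after_states = []
--
--     # try:
--     #     index = state.index(0)
--     # except ValueError:
--     #     return [state]
--
--     # fill with type A
--     # XXX
--     after = list(state)
--     after[index] = 3
--     after_states.extend(fill_col(tuple(after)))
--     # X
--     # X
--     # X
--     if index < len(state)-2 and state[index+1] == 0 and state[index+2] == 0:
--         after = list(state)
--         after[index] = 1
--         after[index+1] = 1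
--         after[index+2] = 1
--         after_states.extend(fill_col(tuple(after)))
--
--     # fill with type B, 1 to the left, 2 orientations
--     # orient up
--     #  X
--     # XX
--     if index > 0 and state[index-1] == 1:
--         after = list(state)
--         after[index] = 2
--         after[index-1] = 2
--         after_states.extend(fill_col(tuple(after)))
--
--     # orient down
--     # XX
--     #  X
--     if index < len(state)-1 and state[index+1] == 1:
--         after = list(state)
--         after[index] = 2
--         after[index+1] = 2
--         after_states.extend(fill_col(tuple(after)))
--     if index < len(state)-2 and state[index+1] == 0 and state[index+2] == 0:
--         # XX
--         # XX
--         # XX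
--         after = list(state)
--         after[index] = 2
--         after[index+1] = 2
--         after[index+2] = 2
--         after_states.extend(fill_col(tuple(after)))
--     if index < len(state)-3 and state[index+1] == 0 and \
--             state[index+2] == 0 and state[index+3] == 0:
--         # XX
--         # XX
--         # X
--         # X
--         after = list(state)
--         after[index] = 2
--         after[index+1] = 2
--         after[index+2] = 1
--         after[index+3] = 1
--         after_states.extend(fill_col(tuple(after)))
--
--     # fill with type B, 2 to the left, 2 orientations
--     # orient up/down
--     if index < len(state)-1 and state[index+1] == 0:
--         # XX
--         # X
--         after = list(state)
--         after[index] = 2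
--         after[index+1] = 1
--         after_states.extend(fill_col(tuple(after)))
--         # X
--         # XX
--         after[index] = 1
--         after[index+1] = 2
--         after_states.extend(fill_col(tuple(after)))
--
--     return after_states
-- ===== SOURCE B (Python) =====
-- # Iterative explicit-stack DFS driven by a table of tile templates: each template
-- # lists (offset, required, new) triples; no recursion, a worklist carries pending
-- # partial states and an output list accumulates the finished ones in DFS order.
-- TEMPLATES = [
--     [(0, 0, 3)],                                   # type A, single column of 3
--     [(0, 0, 1), (1, 0, 1), (2, 0, 1)],             # type A across 3 rows, left col
--     [(0, 0, 2), (-1, 1, 2)],                       # type B, orient up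
--     [(0, 0, 2), (1, 1, 2)],                        # type B, orient down
--     [(0, 0, 2), (1, 0, 2), (2, 0, 2)],             # two type B interlocked, 3 rows
--     [(0, 0, 2), (1, 0, 2), (2, 0, 1), (3, 0, 1)],  # type B + type A tail, 4 rows
--     [(0, 0, 2), (1, 0, 1)],                        # type B, corner up
--     [(0, 0, 1), (1, 0, 2)],                        # type B, corner down
-- ]
--
--
-- def fill_col(state):
--     out = []
--     stack = [state]
--     while stack:
--         s = stack.pop()
--         if all(v > 0 for v in s):
--             out.append(s)
--             continue
--         i = s.index(0)
--         n = len(s)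
--         children = []
--         for tmpl in TEMPLATES:
--             if all(0 <= i + off < n and s[i + off] == req
--                    for off, req, _ in tmpl):
--                 t = list(s)
--                 for off, _, new in tmpl:
--                     t[i + off] = new
--                 children.append(tuple(t))
--         stack.extend(reversed(children))
--     return out
-- ===== Notes on version B (the rewrite author's own statement) =====
-- stated objective: alternative
-- what changed: A's recursive cascade of eight hand-written if-blocks is replaced by a non-recursive explicit-stack worklist whose successor states are generated by one uniform check-and-mutate loop over a data table of (offset, required, new) tile templates, preserving the exact DFS leaf order.
import Mathlib
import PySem

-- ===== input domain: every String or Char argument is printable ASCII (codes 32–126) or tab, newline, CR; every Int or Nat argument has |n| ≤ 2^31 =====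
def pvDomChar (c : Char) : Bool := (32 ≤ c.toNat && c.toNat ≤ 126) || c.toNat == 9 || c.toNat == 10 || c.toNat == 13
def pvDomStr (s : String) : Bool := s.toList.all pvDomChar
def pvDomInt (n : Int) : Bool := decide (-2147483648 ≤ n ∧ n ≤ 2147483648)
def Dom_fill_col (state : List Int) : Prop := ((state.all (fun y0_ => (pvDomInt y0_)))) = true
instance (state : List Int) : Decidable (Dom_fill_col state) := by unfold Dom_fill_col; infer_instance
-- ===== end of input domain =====

-- B replaces A's recursive branch cascade by a non-recursive explicit-stack worklist whose
-- successors come from a data table of tile templates (objective: alternative, same cost).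
-- Both ports use a fuel counter as the totality device; inside Pre_ the fuel always suffices,
-- so the ports are Python-exact there.

-- ===== PORT A =====
def fillColACore : Nat → List Int → List (List Int)
  | 0, _ => []
  | fuel+1, state =>
    if state.all (fun i => decide (0 < i)) then [state]
    else
      match PySem.List.index? state 0 with
      | none => []   -- Python raises ValueError here (excluded by Pre_)
      | some index =>
        let n := state.length
        -- fill with type A (single column of 3, value 3)
        let r1 := fillColACore fuel (state.set index 3)
        -- X X X over three rows, left column
        let r2 := if index + 2 < n ∧ state[index+1]? = some 0 ∧ state[index+2]? = some 0
          then fillColACore fuel (((state.set index 1).set (index+1) 1).set (index+2) 1) else []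
        -- type B, orient up
        let r3 := if 0 < index ∧ state[index-1]? = some 1
          then fillColACore fuel ((state.set index 2).set (index-1) 2) else []
        -- type B, orient down
        let r4 := if index + 1 < n ∧ state[index+1]? = some 1
          then fillColACore fuel ((state.set index 2).set (index+1) 2) else []
        let r5 := if index + 2 < n ∧ state[index+1]? = some 0 ∧ state[index+2]? = some 0
          then fillColACore fuel (((state.set index 2).set (index+1) 2).set (index+2) 2) else []
        let r6 := if index + 3 < n ∧ state[index+1]? = some 0 ∧ state[index+2]? = some 0 ∧ state[index+3]? = some 0
          then fillColACore fuel ((((state.set index 2).set (index+1) 2).set (index+2) 1).set (index+3) 1) else []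
        -- type B, 2 to the left, two orientations (second reuses the first's buffer)
        let r78 := if index + 1 < n ∧ state[index+1]? = some 0
          then
            let after := (state.set index 2).set (index+1) 1
            fillColACore fuel after ++ fillColACore fuel ((after.set index 1).set (index+1) 2)
          else []
        r1 ++ r2 ++ r3 ++ r4 ++ r5 ++ r6 ++ r78

def fill_col (state : List Int) : List (List Int) :=
  fillColACore (state.count 0 + 1) state

-- ===== PORT B =====
def fillColTemplates : List (List (Int × Int × Int)) :=
  [[(0, 0, 3)],
   [(0, 0, 1), (1, 0, 1), (2, 0, 1)],
   [(0, 0, 2), (-1, 1, 2)],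
   [(0, 0, 2), (1, 1, 2)],
   [(0, 0, 2), (1, 0, 2), (2, 0, 2)],
   [(0, 0, 2), (1, 0, 2), (2, 0, 1), (3, 0, 1)],
   [(0, 0, 2), (1, 0, 1)],
   [(0, 0, 1), (1, 0, 2)]]

-- the per-state inner loop of Source B: the list of successor states, in template order
def fillColChildren (s : List Int) (i : Nat) : List (List Int) :=
  fillColTemplates.foldl (fun acc t =>
    if t.all (fun p => decide (0 ≤ (i : Int) + p.1) && decide ((i : Int) + p.1 < (s.length : Int))
          && (PySem.List.pyGet? s ((i : Int) + p.1) == some p.2.1))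
    then acc ++ [t.foldl (fun st p => PySem.List.pySetD st ((i : Int) + p.1) p.2.2) s]
    else acc) []

-- the while-stack loop of Source B; head of the list = top of the stack
-- (stack.extend(reversed(children)) followed by pop-from-end = prepend children in order)
def fillColRun : Nat → List (List Int) → List (List Int) → List (List Int)
  | 0, _, out => out
  | _+1, [], out => out
  | f+1, s :: rest, out =>
    if s.all (fun v => decide (0 < v)) then fillColRun f rest (out ++ [s])
    else match PySem.List.index? s 0 with
      | none => fillColRun f rest out   -- Python raises ValueError here (excluded by Pre_)
      | some i => fillColRun f (fillColChildren s i ++ rest) out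

def fill_col_alt (state : List Int) : List (List Int) :=
  fillColRun (9 ^ (state.count 0 + 1)) [state] []

-- ===== PRECONDITION & SPEC =====
-- Pre_ excludes states containing a negative entry: on those the Python A (and B) eventually
-- reaches a state with no zero that is not all-positive and raises ValueError.
def Pre_fill_col (state : List Int) : Prop := ∀ x ∈ state, 0 ≤ x
instance (state : List Int) : Decidable (Pre_fill_col state) := by unfold Pre_fill_col; infer_instance
def pvWitness_fill_col : List Int := [0, 1, 0]

def Spec_fill_col (state : List Int) (out : List (List Int)) : Prop := out = fill_col_alt state
instance (state : List Int) (out : List (List Int)) : Decidable (Spec_fill_col state out) := by unfold Spec_fill_col; infer_instance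

-- ===== CLAIM (what is proved, stated in full; the proofs are below) =====
def Claim_equal_fill_col : Prop := ∀ (state : List Int), Dom_fill_col state → Pre_fill_col state → Spec_fill_col state (fill_col state)

-- ===== LEMMAS AND PROOFS =====

theorem flatMap_map_filter {α β γ : Type} (p : α → Bool) (g : α → β) (h : β → List γ) (l : List α) :
    ((l.filter p).map g).flatMap h = l.flatMap (fun t => if p t then h (g t) else []) := by
  induction l with
  | nil => rfl
  | cons a l ih =>
    simp only [List.filter_cons, List.flatMap_cons]
    cases hp : p a <;> simp [ih]

-- A's recursion step, expressed over B's successor list (the bridge between the two shapes)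
theorem fillCol_A_step (f : Nat) (s : List Int) (i : Nat)
    (hall : s.all (fun v => decide (0 < v)) = false)
    (hidx : PySem.List.index? s 0 = some i) :
    fillColACore (f+1) s = (fillColChildren s i).flatMap (fillColACore f) := by
  obtain ⟨hk, hk0, -⟩ := PySem.List.getElem_of_index?_eq_some hidx
  have hg0 : s[i]? = some 0 := by rw [List.getElem?_eq_getElem hk, hk0]
  have h0 : (i : Int) + 0 = ((i : Nat) : Int) := by omega
  have h1 : (i : Int) + 1 = ((i + 1 : Nat) : Int) := by omega
  have h2 : (i : Int) + 2 = ((i + 2 : Nat) : Int) := by omega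
  have h3 : (i : Int) + 3 = ((i + 3 : Nat) : Int) := by omega
  rw [fillColACore]
  simp only [hall, Bool.false_eq_true, if_false, hidx]
  rw [fillColChildren, PySem.List.foldl_append_if, List.nil_append, flatMap_map_filter]
  simp only [fillColTemplates, List.flatMap_cons, List.flatMap_nil, List.all_cons, List.all_nil,
    h0, h1, h2, h3, PySem.List.pyGet?_natCast, PySem.List.pySetD_natCast,
    List.foldl_cons, List.foldl_nil,
    Bool.and_eq_true, decide_eq_true_eq, beq_iff_eq, Bool.and_true,
    Nat.cast_nonneg, Nat.cast_lt, true_and, hk, hg0,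
    List.append_nil, if_true]
  have h78 : (((s.set i 2).set (i+1) 1).set i 1).set (i+1) 2
      = (s.set i 1).set (i+1) 2 := by
    apply List.ext_getElem (by simp)
    intro j hj1 hj2
    simp only [List.getElem_set]
    split_ifs <;> simp_all
  have eC2 : ((i+1 < s.length ∧ s[i+1]? = some 0) ∧ i+2 < s.length ∧ s[i+2]? = some 0)
      ↔ (i+2 < s.length ∧ s[i+1]? = some 0 ∧ s[i+2]? = some 0) := by
    constructor
    · rintro ⟨⟨-, a⟩, b, c⟩; exact ⟨b, a, c⟩
    · rintro ⟨b, a, c⟩; exact ⟨⟨by omega, a⟩, b, c⟩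
  have eC6 : ((i+1 < s.length ∧ s[i+1]? = some 0) ∧ (i+2 < s.length ∧ s[i+2]? = some 0) ∧ i+3 < s.length ∧ s[i+3]? = some 0)
      ↔ (i+3 < s.length ∧ s[i+1]? = some 0 ∧ s[i+2]? = some 0 ∧ s[i+3]? = some 0) := by
    constructor
    · rintro ⟨⟨-, a⟩, ⟨-, b⟩, c, d⟩; exact ⟨c, a, b, d⟩
    · rintro ⟨c, a, b, d⟩; exact ⟨⟨by omega, a⟩, ⟨by omega, b⟩, c, d⟩
  have eC3 : ((0 ≤ (i : Int) + -1 ∧ (i : Int) + -1 < (s.length : Int)) ∧ PySem.List.pyGet? s ((i : Int) + -1) = some 1)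
      ↔ (0 < i ∧ s[i-1]? = some 1) := by
    constructor
    · rintro ⟨⟨a, -⟩, g⟩
      have hkp : 0 < i := by omega
      rw [show ((i : Int) + -1) = ((i - 1 : Nat) : Int) from by omega,
        PySem.List.pyGet?_natCast] at g
      exact ⟨hkp, g⟩
    · rintro ⟨hkp, g⟩
      refine ⟨⟨by omega, by omega⟩, ?_⟩
      rw [show ((i : Int) + -1) = ((i - 1 : Nat) : Int) from by omega,
        PySem.List.pyGet?_natCast]
      exact g
  simp only [eC2, eC6, eC3]
  by_cases hc3 : 0 < i ∧ s[i-1]? = some 1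
  · rw [show ((i : Int) + -1) = ((i - 1 : Nat) : Int) from by omega,
      PySem.List.pySetD_natCast]
    by_cases hc7 : i + 1 < s.length ∧ s[i+1]? = some 0
    · have hv1 : s[i+1] = 0 := by
        have h := hc7.2
        rwa [List.getElem?_eq_getElem hc7.1, Option.some.injEq] at h
      simp [hc3, hc7, hv1, h78, List.append_assoc]
    · simp [hc3, hc7, List.append_assoc]
  · by_cases hc7 : i + 1 < s.length ∧ s[i+1]? = some 0
    · have hv1 : s[i+1] = 0 := by
        have h := hc7.2
        rwa [List.getElem?_eq_getElem hc7.1, Option.some.injEq] at h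
      simp [hc3, hc7, hv1, h78, List.append_assoc]
    · simp [hc3, hc7, List.append_assoc]

-- helper facts for the proofs below

theorem fillColACore_all_pos (m : Nat) (s : List Int)
    (hall : s.all (fun v => decide (0 < v)) = true) : fillColACore (m+1) s = [s] := by
  rw [fillColACore]; simp [hall]

theorem pre_set (s : List Int) (j : Nat) (v : Int) (hv : 0 ≤ v) (hs : ∀ x ∈ s, 0 ≤ x) :
    ∀ x ∈ s.set j v, 0 ≤ x := by
  intro x hx
  rcases List.mem_or_eq_of_mem_set hx with hx | rfl
  exacts [hs x hx, hv]

theorem count_set_le (s : List Int) (j : Nat) (v : Int) (hv : v ≠ 0) :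
    (s.set j v).count 0 ≤ s.count 0 := by
  induction s generalizing j with
  | nil => simp
  | cons a l ih =>
    cases j with
    | zero => simp [List.count_cons, hv]
    | succ j =>
      have := ih j
      simp only [List.set_cons_succ, List.count_cons]
      omega

theorem count_set_lt (s : List Int) (i : Nat) (v : Int) (hi : i < s.length) (h0 : s[i] = 0)
    (hv : v ≠ 0) : (s.set i v).count 0 < s.count 0 := by
  induction s generalizing i with
  | nil => simp at hi
  | cons a l ih =>
    cases i with
    | zero =>
      have ha : a = 0 := by simpa using h0
      simp [hv, ha]
    | succ i =>
      have := ih i (by simpa using hi) (by simpa using h0)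
      simp only [List.set_cons_succ, List.count_cons]
      omega

theorem fillCol_index_exists (s : List Int) (hpre : ∀ x ∈ s, 0 ≤ x)
    (hall : ¬ s.all (fun v => decide (0 < v)) = true) :
    ∃ i, PySem.List.index? s 0 = some i := by
  have h0mem : (0 : Int) ∈ s := by
    obtain ⟨x, hx, hx0⟩ : ∃ x ∈ s, ¬ (0 < x) := by simpa [List.all_eq_true] using hall
    have : x = 0 := by have := hpre x hx; omega
    exact this ▸ hx
  have := (PySem.List.index?_isSome_iff (xs := s) (v := 0)).mpr h0mem
  exact Option.isSome_iff_exists.mp this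

-- every successor keeps entries nonnegative and strictly lowers the number of zeros
theorem fillCol_children_spec (s : List Int) (i : Nat)
    (hidx : PySem.List.index? s 0 = some i) (hpre : ∀ x ∈ s, 0 ≤ x) :
    ∀ c ∈ fillColChildren s i, (∀ x ∈ c, 0 ≤ x) ∧ c.count 0 < s.count 0 := by
  obtain ⟨hk, hk0, -⟩ := PySem.List.getElem_of_index?_eq_some hidx
  have h0 : (i : Int) + 0 = ((i : Nat) : Int) := by omega
  have h1 : (i : Int) + 1 = ((i + 1 : Nat) : Int) := by omega
  have h2 : (i : Int) + 2 = ((i + 2 : Nat) : Int) := by omega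
  have h3 : (i : Int) + 3 = ((i + 3 : Nat) : Int) := by omega
  intro c hc
  rw [fillColChildren, PySem.List.foldl_append_if, List.nil_append] at hc
  simp only [List.mem_map, List.mem_filter] at hc
  obtain ⟨t, ⟨ht, hp⟩, rfl⟩ := hc
  fin_cases ht <;>
    simp only [List.all_cons, List.all_nil, Bool.and_eq_true, decide_eq_true_eq, beq_iff_eq,
      Bool.and_true, h0, h1, h2, h3, PySem.List.pyGet?_natCast, Nat.cast_nonneg, Nat.cast_lt,
      true_and, List.foldl_cons, List.foldl_nil, PySem.List.pySetD_natCast] at hp ⊢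
  -- template [(0,0,3)]
  case _ =>
    exact ⟨pre_set _ _ _ (by norm_num) hpre,
      count_set_lt _ _ _ hk hk0 (by norm_num)⟩
  -- template [(0,0,1),(1,0,1),(2,0,1)]
  case _ =>
    exact ⟨pre_set _ _ _ (by norm_num) (pre_set _ _ _ (by norm_num)
        (pre_set _ _ _ (by norm_num) hpre)),
      lt_of_le_of_lt (count_set_le _ _ _ (by norm_num))
        (lt_of_le_of_lt (count_set_le _ _ _ (by norm_num))
          (count_set_lt _ _ _ hk hk0 (by norm_num)))⟩
  -- template [(0,0,2),(-1,1,2)]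
  case _ =>
    obtain ⟨-, ⟨hm1, -⟩, -⟩ := hp
    rw [show ((i : Int) + -1) = ((i - 1 : Nat) : Int) from by omega,
      PySem.List.pySetD_natCast]
    exact ⟨pre_set _ _ _ (by norm_num) (pre_set _ _ _ (by norm_num) hpre),
      lt_of_le_of_lt (count_set_le _ _ _ (by norm_num))
        (count_set_lt _ _ _ hk hk0 (by norm_num))⟩
  -- template [(0,0,2),(1,1,2)]
  case _ =>
    exact ⟨pre_set _ _ _ (by norm_num) (pre_set _ _ _ (by norm_num) hpre),
      lt_of_le_of_lt (count_set_le _ _ _ (by norm_num))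
        (count_set_lt _ _ _ hk hk0 (by norm_num))⟩
  -- template [(0,0,2),(1,0,2),(2,0,2)]
  case _ =>
    exact ⟨pre_set _ _ _ (by norm_num) (pre_set _ _ _ (by norm_num)
        (pre_set _ _ _ (by norm_num) hpre)),
      lt_of_le_of_lt (count_set_le _ _ _ (by norm_num))
        (lt_of_le_of_lt (count_set_le _ _ _ (by norm_num))
          (count_set_lt _ _ _ hk hk0 (by norm_num)))⟩
  -- template [(0,0,2),(1,0,2),(2,0,1),(3,0,1)]
  case _ =>
    exact ⟨pre_set _ _ _ (by norm_num) (pre_set _ _ _ (by norm_num)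
        (pre_set _ _ _ (by norm_num) (pre_set _ _ _ (by norm_num) hpre))),
      lt_of_le_of_lt (count_set_le _ _ _ (by norm_num))
        (lt_of_le_of_lt (count_set_le _ _ _ (by norm_num))
          (lt_of_le_of_lt (count_set_le _ _ _ (by norm_num))
            (count_set_lt _ _ _ hk hk0 (by norm_num))))⟩
  -- template [(0,0,2),(1,0,1)]
  case _ =>
    exact ⟨pre_set _ _ _ (by norm_num) (pre_set _ _ _ (by norm_num) hpre),
      lt_of_le_of_lt (count_set_le _ _ _ (by norm_num))
        (count_set_lt _ _ _ hk hk0 (by norm_num))⟩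
  -- template [(0,0,1),(1,0,2)]
  case _ =>
    exact ⟨pre_set _ _ _ (by norm_num) (pre_set _ _ _ (by norm_num) hpre),
      lt_of_le_of_lt (count_set_le _ _ _ (by norm_num))
        (count_set_lt _ _ _ hk hk0 (by norm_num))⟩


theorem fillCol_children_len (s : List Int) (i : Nat) :
    (fillColChildren s i).length ≤ 8 := by
  rw [fillColChildren, PySem.List.foldl_append_if, List.nil_append]
  simp only [List.length_map]
  exact le_trans (List.length_filter_le _ _) (by simp [fillColTemplates])


-- with enough fuel the A-core is fuel-independent (on nonnegative states)
theorem fillCol_mono : ∀ (n f g : Nat) (s : List Int), s.count 0 ≤ n →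
    s.count 0 < f → s.count 0 < g → (∀ x ∈ s, 0 ≤ x) →
    fillColACore f s = fillColACore g s := by
  intro n
  induction n with
  | zero =>
    intro f g s hn hf hg hpre
    cases f with
    | zero => omega
    | succ f =>
      cases g with
      | zero => omega
      | succ g =>
        by_cases hall : s.all (fun v => decide (0 < v)) = true
        · rw [fillColACore_all_pos f s hall, fillColACore_all_pos g s hall]
        · obtain ⟨i, hidx⟩ := fillCol_index_exists s hpre hall
          obtain ⟨hk, hk0, -⟩ := PySem.List.getElem_of_index?_eq_some hidx
          have : 0 < s.count 0 := List.count_pos_iff.mpr (by exact hk0 ▸ List.getElem_mem hk)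
          omega
  | succ n ih =>
    intro f g s hn hf hg hpre
    cases f with
    | zero => omega
    | succ f =>
      cases g with
      | zero => omega
      | succ g =>
        by_cases hall : s.all (fun v => decide (0 < v)) = true
        · rw [fillColACore_all_pos f s hall, fillColACore_all_pos g s hall]
        · obtain ⟨i, hidx⟩ := fillCol_index_exists s hpre hall
          rw [fillCol_A_step f s i (by simpa using hall) hidx,
            fillCol_A_step g s i (by simpa using hall) hidx]
          refine List.flatMap_congr (fun c hc => ?_)
          obtain ⟨hcpre, hclt⟩ := fillCol_children_spec s i hidx hpre c hc
          exact ih f g c (by omega) (by omega) (by omega) hcpre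


-- the stack loop computes the concatenation of the DFS results of the stacked states
theorem fillCol_run_spec : ∀ (F : Nat) (stack out : List (List Int)),
    (∀ s ∈ stack, ∀ x ∈ s, 0 ≤ x) →
    (stack.map (fun s => 9 ^ (s.count 0 + 1))).sum ≤ F →
    fillColRun F stack out = out ++ stack.flatMap (fun s => fillColACore (s.count 0 + 1) s) := by
  intro F
  induction F with
  | zero =>
    intro stack out hpre hsum
    cases stack with
    | nil => simp [fillColRun]
    | cons s rest =>
      exfalso
      have : 0 < 9 ^ (s.count 0 + 1) := Nat.pow_pos (by norm_num)
      simp only [List.map_cons, List.sum_cons] at hsum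
      omega
  | succ F ih =>
    intro stack out hpre hsum
    cases stack with
    | nil => simp [fillColRun]
    | cons s rest =>
      have hws : 0 < 9 ^ (s.count 0 + 1) := Nat.pow_pos (by norm_num)
      simp only [List.map_cons, List.sum_cons] at hsum
      have hpres : ∀ x ∈ s, 0 ≤ x := hpre s (List.mem_cons_self ..)
      by_cases hall : s.all (fun v => decide (0 < v)) = true
      · rw [show fillColRun (F+1) (s :: rest) out
            = fillColRun F rest (out ++ [s]) from by rw [fillColRun, if_pos hall]]
        rw [ih rest (out ++ [s]) (fun t ht => hpre t (List.mem_cons_of_mem _ ht)) (by omega)]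
        rw [List.flatMap_cons, fillColACore_all_pos _ s hall]
        simp
      · obtain ⟨i, hidx⟩ := fillCol_index_exists s hpres hall
        have hallF : s.all (fun v => decide (0 < v)) = false := by simpa using hall
        rw [show fillColRun (F+1) (s :: rest) out
            = fillColRun F (fillColChildren s i ++ rest) out from by
          rw [fillColRun, if_neg (by simp [hallF]), hidx]]
        have hchild := fillCol_children_spec s i hidx hpres
        obtain ⟨hk, hk0, -⟩ := PySem.List.getElem_of_index?_eq_some hidx
        have hcs : 0 < s.count 0 := List.count_pos_iff.mpr (by exact hk0 ▸ List.getElem_mem hk)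
        have hsumc : ((fillColChildren s i).map (fun c => 9 ^ (c.count 0 + 1))).sum
            ≤ 8 * 9 ^ (s.count 0) := by
          have hb : ∀ w ∈ (fillColChildren s i).map (fun c => 9 ^ (c.count 0 + 1)),
              w ≤ 9 ^ (s.count 0) := by
            intro w hw
            simp only [List.mem_map] at hw
            obtain ⟨c, hc, rfl⟩ := hw
            exact Nat.pow_le_pow_right (by norm_num) (by have := (hchild c hc).2; omega)
          calc ((fillColChildren s i).map (fun c => 9 ^ (c.count 0 + 1))).sum
              ≤ ((fillColChildren s i).map (fun c => 9 ^ (c.count 0 + 1))).length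
                  * 9 ^ (s.count 0) := by
                simpa using List.sum_le_card_nsmul _ _ hb
            _ ≤ 8 * 9 ^ (s.count 0) := by
                have := fillCol_children_len s i
                exact Nat.mul_le_mul_right _ (by simpa using this)
        have h9 : 9 ^ (s.count 0 + 1) = 9 * 9 ^ (s.count 0) := by
          rw [pow_succ]; ring
        have h9p : 0 < 9 ^ (s.count 0) := Nat.pow_pos (by norm_num)
        rw [ih (fillColChildren s i ++ rest) out
          (by
            intro t ht
            rcases List.mem_append.mp ht with ht | ht
            exacts [(hchild t ht).1, hpre t (List.mem_cons_of_mem _ ht)])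
          (by
            rw [List.map_append, List.sum_append]
            omega)]
        have hstep : fillColACore (s.count 0 + 1) s
            = (fillColChildren s i).flatMap (fillColACore (s.count 0)) :=
          fillCol_A_step (s.count 0) s i hallF hidx
        have hcong : (fillColChildren s i).flatMap (fillColACore (s.count 0))
            = (fillColChildren s i).flatMap (fun c => fillColACore (c.count 0 + 1) c) :=
          List.flatMap_congr (fun c hc => by
            obtain ⟨hcpre, hclt⟩ := hchild c hc
            exact fillCol_mono (c.count 0) _ _ c le_rfl (by omega) (by omega) hcpre)
        rw [List.flatMap_append, List.flatMap_cons, hstep, hcong]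


-- ===== VERDICT (by name: the statement is the Claim_ definition above) =====
theorem fill_col_spec : Claim_equal_fill_col := by
  intro state _ hpre
  unfold Spec_fill_col fill_col fill_col_alt
  rw [fillCol_run_spec (9 ^ (state.count 0 + 1)) [state] [] (by simpa using hpre) (by simp)]
  simp
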